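-- pv_equiv track=rewrite | github.com/isrusin/lab-tools | ContrastCalculation/sites.py | digitize_withl
-- ===== SOURCE A (Python) =====
-- nucls = {'A': 0, 'C': 1, 'G': 2, 'T': 3}
--
-- dnucls = {
--         'N': [0, 1, 2, 3],
--         'A': [0], 'B': [1, 2, 3],
--         'C': [1], 'D': [0, 2, 3],
--         'G': [2], 'H': [0, 1, 2],
--         'T': [3], 'V': [0, 1, 2],
--         'M': [0, 1], 'K': [2, 3],
--         'R': [0, 2], 'Y': [1, 3],
--         'W': [0, 3], 'S': [1, 2],
--         }
--
-- def digitize_withl(site):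
-- 	"""Return integer representation of a site and its length.
--
-- 	Returns a list of integers, each one represents one non-degenerate
-- 	variant of the given site.
-- 	"""
-- 	sites = [1]
-- 	begin = 0
-- 	while site[begin] == 'N':
-- 		begin += 1
-- 	end = len(site)
-- 	while site[end - 1] == 'N':
-- 		end -= 1
-- 	for nucl in site[begin:end]:
-- 		if nucl in nucls:
-- 			digit = nucls[nucl]
-- 			sites = [digit + (dsite << 2) for dsite in sites]
-- 		else:
-- 			sites = [digit + (dsite << 2) for dsite in sites
-- 			         for digit in dnucls[nucl]]
-- 	return sites, end-begin
-- ===== SOURCE B (Python) =====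
-- dnucls = {
--         'N': [0, 1, 2, 3],
--         'A': [0], 'B': [1, 2, 3],
--         'C': [1], 'D': [0, 2, 3],
--         'G': [2], 'H': [0, 1, 2],
--         'T': [3], 'V': [0, 1, 2],
--         'M': [0, 1], 'K': [2, 3],
--         'R': [0, 2], 'Y': [1, 3],
--         'W': [0, 3], 'S': [1, 2],
--         }
--
-- def _expand(rest, acc):
-- 	"""Depth-first expansion: all non-degenerate variants of `rest` appended to acc."""
-- 	if not rest:
-- 		return [acc]
-- 	out = []
-- 	for digit in dnucls[rest[0]]:
-- 		out += _expand(rest[1:], acc * 4 + digit)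
-- 	return out
--
-- def digitize_withl(site):
-- 	"""Return integer representation of a site and its length."""
-- 	begin = 0
-- 	while site[begin] == 'N':
-- 		begin += 1
-- 	end = len(site)
-- 	while site[end - 1] == 'N':
-- 		end -= 1
-- 	return _expand(site[begin:end], 1), end - begin
-- ===== Notes on version B (the rewrite author's own statement) =====
-- stated objective: alternative
-- what changed: A grows the whole variant list breadth-first, rebuilding it once per site position with nested comprehensions over two lookup tables; B trims the same way and then expands the trimmed site by a single depth-first recursion over one table, accumulating each variant's integer down one branch at a time.
import Mathlib
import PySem

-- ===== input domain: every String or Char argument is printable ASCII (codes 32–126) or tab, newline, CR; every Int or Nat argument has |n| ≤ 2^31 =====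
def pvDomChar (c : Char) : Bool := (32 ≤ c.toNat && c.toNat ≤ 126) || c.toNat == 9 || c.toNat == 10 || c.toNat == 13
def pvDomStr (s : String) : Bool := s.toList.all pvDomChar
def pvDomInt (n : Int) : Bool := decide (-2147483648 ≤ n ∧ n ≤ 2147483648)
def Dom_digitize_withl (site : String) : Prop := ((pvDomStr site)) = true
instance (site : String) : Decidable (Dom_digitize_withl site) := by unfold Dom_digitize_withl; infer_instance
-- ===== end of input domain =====

-- B replaces A's breadth-first per-position rebuild of the whole variant list by a
-- depth-first recursive expansion of the trimmed site (objective: alternative decomposition).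

-- Both Python versions contain the identical two while-loops trimming leading/trailing
-- 'N' (raising IndexError on empty/all-'N' input); the shared helpers below port them.
-- 'while site[begin] == 'N': begin += 1' — none = the IndexError (running off the end).
def pvBegin : List Char → Option Nat
  | [] => none
  | c :: rest => if c = 'N' then (pvBegin rest).map (· + 1) else some 0

-- 'end = len(site); while site[end-1] == 'N': end -= 1' — counts trailing 'N's down.
-- (Within Pre_ the loop stops at the last non-'N'; a negative-wrapping index is
-- unreachable because on all-'N' input the begin-loop raises first.)
def pvEnd (cs : List Char) : Nat := cs.length - (cs.reverse.takeWhile (· = 'N')).length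

-- ===== PORT A =====
def nuclsD : PySem.Dict Char Int := PySem.Dict.mk [('A', 0), ('C', 1), ('G', 2), ('T', 3)]

def dnuclsD : PySem.Dict Char (List Int) :=
  PySem.Dict.mk
    [('N', [0, 1, 2, 3]), ('A', [0]), ('B', [1, 2, 3]), ('C', [1]), ('D', [0, 2, 3]),
     ('G', [2]), ('H', [0, 1, 2]), ('T', [3]), ('V', [0, 1, 2]), ('M', [0, 1]),
     ('K', [2, 3]), ('R', [0, 2]), ('Y', [1, 3]), ('W', [0, 3]), ('S', [1, 2])]

-- one iteration of A's for-loop body; none = the KeyError on dnucls[nucl]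
-- (dsite << 2 on the nonneg accumulators is dsite * 4, as in Python)
def aStep (sites : List Int) (c : Char) : Option (List Int) :=
  match nuclsD.get? c with
  | some digit => some (sites.map (fun dsite => digit + dsite * 4))
  | none =>
    match dnuclsD.get? c with
    | none => none
    | some ds => some (sites.flatMap (fun dsite => ds.map (fun digit => digit + dsite * 4)))

def aFold (st : Option (List Int)) (cs : List Char) : Option (List Int) :=
  cs.foldl (fun st c => match st with | none => none | some s => aStep s c) st

def digitize_withl (site : String) : List Int × Int :=
  let cs := site.toList
  match pvBegin cs with
  | none => ([], 0)  -- IndexError: excluded by Pre_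
  | some b =>
    let e := pvEnd cs
    match aFold (some [1]) ((cs.take e).drop b) with
    | none => ([], 0)  -- KeyError: excluded by Pre_
    | some sites => (sites, (e : Int) - (b : Int))

-- ===== PORT B =====
-- _expand(rest, acc): depth-first; none = the KeyError on dnucls[rest[0]]
mutual
def bExpand : List Char → Int → Option (List Int)
  | [], acc => some [acc]
  | c :: rest, acc =>
    match dnuclsD.get? c with
    | none => none
    | some ds => bLoop ds rest acc
termination_by cs _ => (cs.length, 0)
-- the 'for digit in dnucls[rest[0]]: out += _expand(rest[1:], acc * 4 + digit)' loop
def bLoop : List Int → List Char → Int → Option (List Int)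
  | [], _, _ => some []
  | d :: ds, rest, acc =>
    match bExpand rest (acc * 4 + d) with
    | none => none
    | some sub =>
      match bLoop ds rest acc with
      | none => none
      | some more => some (sub ++ more)
termination_by ds rest _ => (rest.length, ds.length + 1)
end

def digitize_withl_alt (site : String) : List Int × Int :=
  let cs := site.toList
  match pvBegin cs with
  | none => ([], 0)  -- IndexError: excluded by Pre_
  | some b =>
    let e := pvEnd cs
    match bExpand ((cs.take e).drop b) 1 with
    | none => ([], 0)  -- KeyError: excluded by Pre_
    | some sites => (sites, (e : Int) - (b : Int))

-- ===== PRECONDITION & SPEC =====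
-- Pre_ excludes exactly the inputs where Python A raises: all-'N' (incl. empty) strings
-- (IndexError in the trimming loops) and strings containing a character outside the
-- IUPAC alphabet ACGTNBDHVMKRYWS (KeyError in the expansion; only leading/trailing
-- characters, which are all 'N', escape the expansion, so the condition may read the
-- whole string).
def Pre_digitize_withl (site : String) : Prop :=
  (site.toList.any (fun c => c ≠ 'N')) = true ∧
  (site.toList.all
    (fun c => ['A','C','G','T','N','B','D','H','V','M','K','R','Y','W','S'].contains c)) = true
instance (site : String) : Decidable (Pre_digitize_withl site) := by
  unfold Pre_digitize_withl; infer_instance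

def pvWitness_digitize_withl : String := "NACGTN"

def Spec_digitize_withl (site : String) (out : List Int × Int) : Prop := out = digitize_withl_alt site
instance (site : String) (out : List Int × Int) : Decidable (Spec_digitize_withl site out) := by unfold Spec_digitize_withl; infer_instance

-- ===== CLAIM (what is proved, stated in full; the proofs are below) =====
def Claim_equal_digitize_withl : Prop := ∀ (site : String), Dom_digitize_withl site → Pre_digitize_withl site → Spec_digitize_withl site (digitize_withl site)

-- ===== LEMMAS AND PROOFS =====

-- option-valued flat-map: the loop shape shared by both expansion structures
def optFlat (f : Int → Option (List Int)) : List Int → Option (List Int)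
  | [] => some []
  | s :: rest =>
    match f s, optFlat f rest with
    | some a, some b => some (a ++ b)
    | _, _ => none

theorem optFlat_append (f : Int → Option (List Int)) (a b : List Int) :
    optFlat f (a ++ b) =
      match optFlat f a, optFlat f b with
      | some x, some y => some (x ++ y)
      | _, _ => none := by
  induction a with
  | nil => cases h : optFlat f b <;> simp [optFlat, h]
  | cons s rest ih =>
    simp only [List.cons_append, optFlat, ih]
    cases f s <;> cases optFlat f rest <;> cases optFlat f b <;> simp

theorem optFlat_flatMap (f : Int → Option (List Int)) (g : Int → List Int) (L : List Int) :
    optFlat f (L.flatMap g) = optFlat (fun s => optFlat f (g s)) L := by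
  induction L with
  | nil => rfl
  | cons s rest ih => simp only [List.flatMap_cons, optFlat_append, optFlat, ih]

theorem optFlat_congr_point {f g : Int → Option (List Int)} (h : ∀ s, f s = g s) :
    ∀ L, optFlat f L = optFlat g L := by
  intro L; induction L with
  | nil => rfl
  | cons s rest ih => simp [optFlat, h s, ih]

theorem optFlat_singleton (f : Int → Option (List Int)) (s : Int) :
    optFlat f [s] = f s := by
  cases h : f s <;> simp [optFlat, h]

theorem optFlat_ne_nil_none (f : Int → Option (List Int)) (L : List Int) (hL : L ≠ [])
    (hf : ∀ s ∈ L, f s = none) : optFlat f L = none := by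
  cases L with
  | nil => exact absurd rfl hL
  | cons s rest => simp [optFlat, hf s (by simp)]

-- every list stored in dnucls is nonempty
theorem dnucls_val_ne_nil (c : Char) (ds : List Int) (h : dnuclsD.get? c = some ds) :
    ds ≠ [] := by
  simp only [PySem.Dict.get?, Option.map_eq_some_iff] at h
  obtain ⟨p, hf, hp⟩ := h
  have hm := List.mem_of_find?_eq_some hf
  simp only [dnuclsD] at hm
  simp at hm
  rcases hm with ⟨rfl, rfl⟩|⟨rfl, rfl⟩|⟨rfl, rfl⟩|⟨rfl, rfl⟩|⟨rfl, rfl⟩|⟨rfl, rfl⟩|⟨rfl, rfl⟩|⟨rfl, rfl⟩|⟨rfl, rfl⟩|⟨rfl, rfl⟩|⟨rfl, rfl⟩|⟨rfl, rfl⟩|⟨rfl, rfl⟩|⟨rfl, rfl⟩|⟨rfl, rfl⟩ <;> subst hp <;> simp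

-- nucls agrees with dnucls on A/C/G/T (so A's two branches are one table lookup in B)
theorem nucls_dnucls (c : Char) (d : Int) (h : nuclsD.get? c = some d) :
    dnuclsD.get? c = some [d] := by
  simp only [PySem.Dict.get?, Option.map_eq_some_iff] at h
  obtain ⟨p, hf, hp⟩ := h
  have hm := List.mem_of_find?_eq_some hf
  have hc := List.find?_some hf
  simp only [nuclsD] at hm
  simp at hm hc
  rcases hm with ⟨rfl, rfl⟩|⟨rfl, rfl⟩|⟨rfl, rfl⟩|⟨rfl, rfl⟩ <;> subst hp <;> subst hc <;> decide

theorem aFold_none (cs : List Char) : aFold none cs = none := by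
  induction cs with
  | nil => rfl
  | cons c rest ih => simpa [aFold, List.foldl_cons] using ih

-- B's digit loop is an optFlat over the shifted accumulators
theorem bLoop_eq_optFlat (ds : List Int) (rest : List Char) (acc : Int) :
    bLoop ds rest acc = optFlat (bExpand rest) (ds.map (fun d => acc * 4 + d)) := by
  induction ds with
  | nil => simp [bLoop, optFlat]
  | cons d ds ih =>
    simp only [bLoop, List.map_cons, optFlat, ih]
    cases bExpand rest (acc * 4 + d) <;>
      cases optFlat (bExpand rest) (ds.map (fun d => acc * 4 + d)) <;> simp

theorem optFlat_bExpand_nil : ∀ L : List Int, optFlat (bExpand []) L = some L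
  | [] => rfl
  | s :: rest => by simp [optFlat, bExpand, optFlat_bExpand_nil rest]

-- main invariant: A's breadth-first fold from any nonempty layer L equals the
-- concatenation of B's depth-first expansions of the members of L
theorem aFold_eq_optFlat (cs : List Char) : ∀ (L : List Int), L ≠ [] →
    aFold (some L) cs = optFlat (bExpand cs) L := by
  induction cs with
  | nil =>
    intro L _
    simp [aFold, optFlat_bExpand_nil]
  | cons c rest ih =>
    intro L hL
    have hstep : aFold (some L) (c :: rest) = aFold (aStep L c) rest := rfl
    rw [hstep]
    rcases hd : dnuclsD.get? c with _ | ds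
    · -- KeyError case: both sides are none (nucls' keys are dnucls keys)
      have hn : nuclsD.get? c = none := by
        cases hn : nuclsD.get? c with
        | none => rfl
        | some d => rw [nucls_dnucls c d hn] at hd; cases hd
      have ha : aStep L c = none := by simp [aStep, hn, hd]
      rw [ha, aFold_none]
      exact (optFlat_ne_nil_none _ L hL (fun s _ => by simp [bExpand, hd])).symm
    · have hds : ds ≠ [] := dnucls_val_ne_nil c ds hd
      have hstep2 : aStep L c
          = some (L.flatMap (fun dsite => ds.map (fun digit => digit + dsite * 4))) := by
        cases hn : nuclsD.get? c with
        | none => simp [aStep, hn, hd]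
        | some d =>
          have hdd := nucls_dnucls c d hn
          rw [hd] at hdd
          cases hdd
          simp only [aStep, hn, Option.some.injEq]
          exact List.map_eq_flatMap
      rw [hstep2]
      have hne : L.flatMap (fun dsite => ds.map (fun digit => digit + dsite * 4)) ≠ [] := by
        cases L with
        | nil => exact absurd rfl hL
        | cons s t =>
          cases ds with
          | nil => exact absurd rfl hds
          | cons d e => simp
      rw [ih _ hne, optFlat_flatMap]
      refine optFlat_congr_point (fun s => ?_) L
      have hmap : (ds.map (fun digit => digit + s * 4)) = ds.map (fun d => s * 4 + d) := by
        simp [Int.add_comm]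
      rw [hmap, ← bLoop_eq_optFlat]
      simp [bExpand, hd]

-- ===== VERDICT (by name: the statement is the Claim_ definition above) =====
theorem digitize_withl_spec : Claim_equal_digitize_withl := by
  intro site _ _
  unfold Spec_digitize_withl digitize_withl digitize_withl_alt
  cases hb : pvBegin site.toList with
  | none => simp [hb]
  | some b =>
    simp only [hb]
    rw [aFold_eq_optFlat _ [1] (by simp), optFlat_singleton]
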